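-- pv_equiv track=rewrite | github.com/Agentic-Environmental-Engineering/GymVerse | gem/gem/envs/RLVE/subset_sum_sequence_env.py | _compute_reference_answer
-- ===== SOURCE A (Python) =====
-- def _compute_reference_answer(k: int, n: int) -> int:
--     """Compute the N-th term of the sequence using the original algorithm."""
--     ans = 0
--     base = 1
--     while n:
--         if n & 1:
--             ans += base
--         n //= 2
--         base *= k
--     return ans
-- ===== SOURCE B (Python) =====
-- def _compute_reference_answer(k: int, n: int) -> int:
--     """Compute the N-th term of the sequence using the original algorithm."""
--     ans = 0
--     for c in bin(n)[2:]:
--         ans = ans * k + (1 if c == '1' else 0)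
--     return ans
-- ===== Notes on version B (the rewrite author's own statement) =====
-- stated objective: idiomatic
-- what changed: B iterates over the binary digits most-significant-first (bin(n)[2:]) with a Horner multiply-accumulate ans = ans*k + bit, replacing A's LSB-first loop that maintains a separate power variable base = k^i.
-- outside the precondition, e.g. on _compute_reference_answer(2, -1): A does not finish within the time limit, B returns 1
import Mathlib
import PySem

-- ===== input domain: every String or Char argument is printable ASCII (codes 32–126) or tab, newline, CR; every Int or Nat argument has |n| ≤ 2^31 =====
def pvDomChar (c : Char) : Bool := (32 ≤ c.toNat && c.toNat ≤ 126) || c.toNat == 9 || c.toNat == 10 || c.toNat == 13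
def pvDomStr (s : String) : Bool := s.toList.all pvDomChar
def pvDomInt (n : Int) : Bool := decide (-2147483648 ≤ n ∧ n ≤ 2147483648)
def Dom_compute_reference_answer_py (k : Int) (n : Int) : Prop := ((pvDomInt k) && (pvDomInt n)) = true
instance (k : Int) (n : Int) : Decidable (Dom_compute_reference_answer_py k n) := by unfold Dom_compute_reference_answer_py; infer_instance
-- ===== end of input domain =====

-- B iterates the binary digits MSB-first with Horner multiply-accumulate instead of A's
-- LSB-first loop with a separate power accumulator; objective: idiomatic, same cost.


-- ===== PORT A =====
-- `while n:` with `n //= 2`: for n < 0 Python never terminates (floor division stalls at -1),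
-- so those inputs are outside Pre_; the `n ≤ 0` guard only totalises the recursion there.
-- `n & 1` is PySem.Int.band n 1; `n //= 2` is PySem.Int.floordiv n 2.
def pvALoop (k : Int) (n : Int) (ans : Int) (base : Int) : Int :=
  if _h : n ≤ 0 then ans
  else pvALoop k (PySem.Int.floordiv n 2)
        (if PySem.Int.band n 1 ≠ 0 then ans + base else ans) (base * k)
  termination_by n.toNat
  decreasing_by
    have h2 : PySem.Int.floordiv n 2 = n / 2 := PySem.Int.floordiv_eq_ediv_of_pos (by omega)
    simp only [h2]; omega

def compute_reference_answer_py (k : Int) (n : Int) : Int :=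
  pvALoop k n 0 1

-- ===== PORT B =====
-- bin(n)[2:] for n ≥ 0, as the list of binary digits most-significant-first
-- (LSB-first digits, reversed; n = 0 yields the single digit "0").
def pvLsbBits (m : Nat) : List Int :=
  if m = 0 then [] else ((m % 2 : Nat) : Int) :: pvLsbBits (m / 2)

def pvBinDigits (m : Nat) : List Int :=
  if m = 0 then [0] else (pvLsbBits m).reverse

def compute_reference_answer_py_alt (k : Int) (n : Int) : Int :=
  (pvBinDigits n.toNat).foldl (fun ans d => ans * k + d) 0

-- ===== PRECONDITION & SPEC =====
-- Pre_ excludes n < 0, on which A's while-loop never terminates (n //= 2 stalls at -1).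
def Pre_compute_reference_answer_py (k : Int) (n : Int) : Prop := 0 ≤ n
instance (k : Int) (n : Int) : Decidable (Pre_compute_reference_answer_py k n) := by
  unfold Pre_compute_reference_answer_py; infer_instance

def pvWitness_compute_reference_answer_py : Int × Int := (3, 11)

def Spec_compute_reference_answer_py (k : Int) (n : Int) (out : Int) : Prop := out = compute_reference_answer_py_alt k n
instance (k : Int) (n : Int) (out : Int) : Decidable (Spec_compute_reference_answer_py k n out) := by unfold Spec_compute_reference_answer_py; infer_instance

-- ===== CLAIM (what is proved, stated in full; the proofs are below) =====
def Claim_equal_compute_reference_answer_py : Prop := ∀ (k : Int) (n : Int), Dom_compute_reference_answer_py k n → Pre_compute_reference_answer_py k n → Spec_compute_reference_answer_py k n (compute_reference_answer_py k n)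

-- ===== LEMMAS AND PROOFS =====

-- common value: V k m = Σ bit_i(m) * k^i
def pvV (k : Int) (m : Nat) : Int :=
  if m = 0 then 0 else ((m % 2 : Nat) : Int) + k * pvV k (m / 2)

theorem pvALoop_eq (k : Int) (m : Nat) (ans base : Int) :
    pvALoop k (m : Int) ans base = ans + base * pvV k m := by
  induction m using Nat.strong_induction_on generalizing ans base with
  | _ m ih =>
    by_cases h0 : m = 0
    · subst h0; rw [pvALoop, pvV]; simp
    · rw [pvALoop, pvV]
      have hpos : ¬ ((m : Int) ≤ 0) := by omega
      have hdiv : PySem.Int.floordiv (m : Int) 2 = ((m / 2 : Nat) : Int) :=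
        PySem.Int.floordiv_natCast m 2
      have hband : PySem.Int.band (m : Int) 1 = ((m % 2 : Nat) : Int) := by
        rw [PySem.Int.band_one]; exact PySem.Int.mod_natCast m 2
      rw [dif_neg hpos, if_neg h0, hdiv, hband,
          ih (m / 2) (Nat.div_lt_self (by omega) (by omega))]
      rcases Nat.mod_two_eq_zero_or_one m with h | h <;>
        simp only [h] <;> push_cast <;> ring

theorem pvHorner_append (k : Int) (a d : Int) (l : List Int) :
    (l ++ [d]).foldl (fun ans x => ans * k + x) a
      = (l.foldl (fun ans x => ans * k + x) a) * k + d := by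
  simp [List.foldl_append]

theorem pvHorner_rev_lsb (k : Int) (m : Nat) :
    ((pvLsbBits m).reverse).foldl (fun ans d => ans * k + d) 0 = pvV k m := by
  induction m using Nat.strong_induction_on with
  | _ m ih =>
    by_cases h0 : m = 0
    · subst h0; rw [pvLsbBits, pvV]; simp
    · rw [pvLsbBits, pvV, if_neg h0, if_neg h0]
      simp only [List.reverse_cons]
      rw [pvHorner_append, ih (m / 2) (Nat.div_lt_self (by omega) (by omega))]
      ring

theorem pvAlt_eq (k : Int) (m : Nat) :
    compute_reference_answer_py_alt k (m : Int) = pvV k m := by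
  unfold compute_reference_answer_py_alt pvBinDigits
  rw [Int.toNat_natCast]
  by_cases h0 : m = 0
  · subst h0; rw [pvV]; simp
  · rw [if_neg h0]; exact pvHorner_rev_lsb k m

-- ===== VERDICT (by name: the statement is the Claim_ definition above) =====
theorem compute_reference_answer_py_spec : Claim_equal_compute_reference_answer_py := by
  intro k n _ hn
  replace hn : 0 ≤ n := hn
  unfold Spec_compute_reference_answer_py compute_reference_answer_py
  obtain ⟨m, rfl⟩ : ∃ m : Nat, n = (m : Int) := ⟨n.toNat, by omega⟩
  rw [pvALoop_eq, pvAlt_eq]; ring
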